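-- pv_equiv track=rewrite | github.com/zadkie1ll/shredder-vpn-bot | handlers/misc.py | referrer_username_from_args
-- ===== SOURCE A (Python) =====
-- def referrer_username_from_args(args: str) -> str | None:
--     try:
--         referrer_username: str | None = None
--         if args:
--             lst = args.split("-")
--             for arg in lst:
--                 if arg.startswith("a"):
--                     referrer_username = arg[len("a") :]
--                     return referrer_username
--     except Exception:
--         return None
-- ===== SOURCE B (Python) =====
-- def referrer_username_from_args(args: str):
--     try:
--         boundary = True
--         it = iter(args)
--         for ch in it:
--             if boundary and ch == "a":
--                 out = []
--                 for c in it: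
--                     if c == "-":
--                         break
--                     out.append(c)
--                 return "".join(out)
--             boundary = ch == "-"
--         return None
--     except Exception:
--         return None
-- ===== Notes on version B (the rewrite author's own statement) =====
-- stated objective: alternative
-- what changed: Replaced the dash-split plus token loop with a single left-to-right character scan over one shared iterator, using a boundary flag to detect token starts and collecting the match tail in place (no intermediate token list).
import Mathlib
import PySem

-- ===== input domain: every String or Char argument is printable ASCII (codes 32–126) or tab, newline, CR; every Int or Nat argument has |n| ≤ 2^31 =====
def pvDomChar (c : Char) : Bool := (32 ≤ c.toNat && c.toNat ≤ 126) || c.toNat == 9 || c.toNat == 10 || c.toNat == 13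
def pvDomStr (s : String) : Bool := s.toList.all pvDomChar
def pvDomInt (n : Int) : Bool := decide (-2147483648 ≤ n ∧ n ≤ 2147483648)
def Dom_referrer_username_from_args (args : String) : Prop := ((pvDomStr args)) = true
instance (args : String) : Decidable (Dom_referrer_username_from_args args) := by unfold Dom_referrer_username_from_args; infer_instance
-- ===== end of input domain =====

-- B replaces split('-') + token loop by a single character scan with a boundary flag; alternative decomposition, same cost.

-- ===== PORT A =====
-- the 'for arg in lst' loop: first token starting with 'a' yields arg[1:]
def aLoop : List (List Char) → Option String
  | [] => none
  | arg :: rest =>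
    if PySem.Chars.startswith arg ['a'] then
      some (String.ofList (PySem.List.slice arg (some 1) none))   -- arg[len("a"):]
    else aLoop rest

def referrer_username_from_args (args : String) : Option String :=
  if args = "" then none                               -- 'if args:' falsy → falls through, returns None
  else aLoop (PySem.Chars.splitOn args.toList ['-'])   -- args.split("-")

-- ===== PORT B =====
-- inner 'for c in it: if c == "-": break; out.append(c)' then ''.join(out)
def bTake : List Char → List Char
  | [] => []
  | c :: cs => if c = '-' then [] else c :: bTake cs

-- outer 'for ch in it' with the boundary flag
def bLoop : List Char → Bool → Option (List Char)
  | [], _ => none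
  | ch :: cs, boundary =>
    if boundary && (ch = 'a') then some (bTake cs)
    else bLoop cs (ch = '-')

def referrer_username_from_args_alt (args : String) : Option String :=
  (bLoop args.toList true).map String.ofList

-- ===== PRECONDITION & SPEC =====
def Spec_referrer_username_from_args (args : String) (out : Option String) : Prop := out = referrer_username_from_args_alt args
instance (args : String) (out : Option String) : Decidable (Spec_referrer_username_from_args args out) := by unfold Spec_referrer_username_from_args; infer_instance

-- ===== CLAIM (what is proved, stated in full; the proofs are below) =====
def Claim_equal_referrer_username_from_args : Prop := ∀ (args : String), Dom_referrer_username_from_args args → Spec_referrer_username_from_args args (referrer_username_from_args args)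

-- ===== LEMMAS AND PROOFS =====

-- chars-level version of A's token loop
def fA : List (List Char) → Option (List Char)
  | [] => none
  | t :: ts => match t with
    | 'a' :: tl => some tl
    | _ => fA ts

-- A's search expressed on the raw character stream: cur is the current token so far (reversed), l the rest
def remA : List Char → List Char → Option (List Char)
  | cur, [] => fA [cur.reverse]
  | cur, c :: cs => if c = '-' then (fA [cur.reverse]).orElse (fun _ => remA [] cs) else remA (c :: cur) cs

theorem fA_append (xs ys : List (List Char)) :
    fA (xs ++ ys) = (fA xs).orElse (fun _ => fA ys) := by
  induction xs with
  | nil => simp [fA]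
  | cons t ts ih =>
    match t with
    | [] => simpa [fA] using ih
    | c :: tl =>
      by_cases h : c = 'a'
      · subst h; simp [fA]
      · simp only [List.cons_append, fA]
        split
        · simp_all
        · exact ih

theorem aLoop_eq_fA (ts : List (List Char)) : aLoop ts = (fA ts).map String.ofList := by
  induction ts with
  | nil => simp [aLoop, fA]
  | cons t rest ih =>
    match t with
    | [] => simpa [aLoop, fA, PySem.Chars.startswith] using ih
    | c :: tl =>
      by_cases h : c = 'a'
      · subst h
        simp [aLoop, fA, PySem.Chars.startswith, List.isPrefixOf,
          PySem.List.slice_from_one]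
      · simp only [aLoop, fA]
        rw [if_neg (by simp [PySem.Chars.startswith, List.isPrefixOf, Ne.symm h]), ih]
        split
        · simp_all
        · rfl

-- unfolding lemmas for PySem.Chars.splitOn.go with sep = ['-']
theorem go_nil (fuel : Nat) (cur : List Char) (acc : List (List Char)) :
    PySem.Chars.splitOn.go ['-'] fuel [] cur acc = (cur.reverse :: acc).reverse := by
  cases fuel <;> simp [PySem.Chars.splitOn.go]

theorem go_cons (fuel : Nat) (c : Char) (rest cur : List Char) (acc : List (List Char)) :
    PySem.Chars.splitOn.go ['-'] (fuel + 1) (c :: rest) cur acc =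
      if c = '-' then PySem.Chars.splitOn.go ['-'] fuel rest [] (cur.reverse :: acc)
      else PySem.Chars.splitOn.go ['-'] fuel rest (c :: cur) acc := by
  by_cases h : c = '-'
  · subst h; simp [PySem.Chars.splitOn.go, List.isPrefixOf]
  · simp [PySem.Chars.splitOn.go, List.isPrefixOf, h, Ne.symm h]

theorem fA_go (l : List Char) (fuel : Nat) (cur : List Char) (acc : List (List Char))
    (hf : l.length ≤ fuel) :
    fA (PySem.Chars.splitOn.go ['-'] fuel l cur acc) =
      (fA acc.reverse).orElse (fun _ => remA cur l) := by
  induction l generalizing fuel cur acc with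
  | nil =>
    rw [go_nil]
    simp only [List.reverse_cons, remA]
    exact fA_append _ _
  | cons c cs ih =>
    match fuel with
    | fuel + 1 =>
      rw [go_cons]
      by_cases h : c = '-'
      · subst h
        rw [if_pos rfl, ih _ _ _ (by simpa using Nat.le_of_succ_le_succ hf)]
        simp only [List.reverse_cons, fA_append, remA, if_pos]
        cases fA acc.reverse <;> simp [Option.orElse]
      · rw [if_neg h, ih _ _ _ (by simpa using Nat.le_of_succ_le_succ hf)]
        simp [remA, h]

theorem fA_single_ne (d : Char) (tl : List Char) (hd : d ≠ 'a') : fA [d :: tl] = none := by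
  simp only [fA]
  split
  · rename_i heq
    simp_all
  · rfl

-- once the current token started with 'a' (cur.reverse = 'a' :: tl), A's answer is fixed: tl plus the rest of the token
theorem remA_match (l : List Char) : ∀ (cur tl : List Char), cur.reverse = 'a' :: tl →
    remA cur l = some (tl ++ bTake l) := by
  induction l with
  | nil => intro cur tl hrev; simp [remA, hrev, fA, bTake]
  | cons c cs ih =>
    intro cur tl hrev
    by_cases h : c = '-'
    · subst h; simp [remA, hrev, fA, Option.orElse, bTake]
    · rw [remA, if_neg h, ih (c :: cur) (tl ++ [c]) (by simp [hrev])]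
      simp [bTake, h]

-- main bridge: from a token boundary A's stream search equals B's scan with boundary = true,
-- and mid-token (first char not 'a') it equals B's scan with boundary = false
theorem remA_both (l : List Char) :
    remA [] l = bLoop l true ∧
    ∀ (cur : List Char), cur ≠ [] → cur.reverse.head? ≠ some 'a' → remA cur l = bLoop l false := by
  induction l with
  | nil =>
    refine ⟨by simp [remA, fA, bLoop], ?_⟩
    intro cur hcur hh
    rcases hrev : cur.reverse with _ | ⟨d, tl⟩
    · exact absurd (by simpa using hrev) hcur
    · have hd : d ≠ 'a' := by rw [hrev] at hh; simpa using hh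
      simp [remA, hrev, fA_single_ne d tl hd, bLoop]
  | cons c cs ih =>
    obtain ⟨ih1, ih2⟩ := ih
    constructor
    · by_cases ha : c = 'a'
      · subst ha
        rw [remA, if_neg (by decide), remA_match cs ['a'] [] (by simp)]
        simp [bLoop]
      · by_cases hd : c = '-'
        · subst hd
          simp [remA, fA, Option.orElse, bLoop, ih1]
        · rw [remA, if_neg hd, ih2 [c] (by simp) (by simpa using ha)]
          simp [bLoop, ha, hd]
    · intro cur hcur hh
      rcases hrev : cur.reverse with _ | ⟨d, tl⟩
      · exact absurd (by simpa using hrev) hcur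
      · have hd : d ≠ 'a' := by rw [hrev] at hh; simpa using hh
        by_cases h : c = '-'
        · subst h
          simp [remA, hrev, fA_single_ne d tl hd, Option.orElse, bLoop, ih1]
        · rw [remA, if_neg h,
            ih2 (c :: cur) (by simp) (by simp [hrev, hd])]
          simp [bLoop, h]

theorem remA_start (l : List Char) : remA [] l = bLoop l true := (remA_both l).1

-- ===== VERDICT (by name: the statement is the Claim_ definition above) =====
theorem referrer_username_from_args_spec : Claim_equal_referrer_username_from_args := by
  intro args _
  show referrer_username_from_args args = referrer_username_from_args_alt args
  unfold referrer_username_from_args referrer_username_from_args_alt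
  by_cases h : args = ""
  · subst h; simp [bLoop]
  · rw [if_neg h, PySem.Chars.splitOn, aLoop_eq_fA,
      fA_go _ _ _ _ (by omega), remA_start]
    simp [fA, Option.orElse]
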